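/- GENERATED by farm/mkstatement.py from design/units.tsv (unit `compute_window`) and the Specs of Vorbis/Spec/*.lean — do not edit.
   THE STATEMENT of the proof unit `compute_window`: the function `compute_window` (42 instructions) satisfies its contract,
   given the contracts of its callees. What the names mean: Vorbis/Spec/Basic.lean. The theorem to prove:
   `theorem compute_window_ok : Vorbis.Spec.compute_window.Statement`. -/
import Vorbis.Spec.Leaves2
import Vorbis.Spec.Libm
import Vorbis.Spec.Mdct
namespace Vorbis.Spec.compute_window
open X86 X86.User Asan

/-- The statement of unit `compute_window`. -/
def Statement : Prop :=
  ∀ (Lay : Layout) (_hLay : Lay.hi = 0x1000000) (μ : Microarch) (_hμ : UserX.MicroOK μ) (u₀ : State)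
    (_hcode : HasCodeNat Lay u₀ Vorbis.L.compute_window.entry Vorbis.Code.code_compute_window.nat Vorbis.L.compute_window.size)
    (_h_sin : ∀ (others : List Obj) (frames : List (Nat × FrameLayout)), Calls Lay μ Vorbis.WayInv (Vorbis.conv u₀) Vorbis.L.sin.entry (Vorbis.Spec.sin.spec others frames))
    (_h_square : ∀ (others : List Obj) (frames : List (Nat × FrameLayout)), Calls Lay μ Vorbis.WayInv (Vorbis.conv u₀) Vorbis.L.square.entry (Vorbis.Spec.square.spec others frames))
    (_h_asan_store4_noabort : Asan.SmallCheck Lay μ Vorbis.WayInv (Vorbis.CodeOK u₀) [.rax, .rcx, .rdx] 4 Vorbis.L.__asan_store4_noabort.entry),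
    ∀ (others : List Obj) (frames : List (Nat × FrameLayout)), Calls Lay μ Vorbis.WayInv (Vorbis.conv u₀) Vorbis.L.compute_window.entry (Vorbis.Spec.compute_window.spec others frames)

end Vorbis.Spec.compute_window
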